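-- pv_equiv track=rewrite | github.com/FrK06/web-rag-original | app.py | detect_tools_used
-- ===== SOURCE A (Python) =====
-- from typing import List, Dict, Optional, Union
--
-- def detect_tools_used(response: str) -> List[str]:
--     """Detect which tools were used based on response content"""
--     tools_used = []
--
--     # Detect tool usage based on response content
--     if any(term in response.lower() for term in ["search result", "found information", "according to", "sources:"]):
--         tools_used.append("web-search")
--
--     if any(term in response.lower() for term in ["scraped", "from the website", "page content"]):
--         tools_used.append("web-scrape")
--
--     if any(term in response.lower() for term in ["sms sent", "message sent", "texted"]):
--         tools_used.append("sms")
--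
--     if any(term in response.lower() for term in ["call initiated", "called", "phone call"]):
--         tools_used.append("call")
--
--     if any(term in response.lower() for term in ["speaking", "audio response", "listen"]):
--         tools_used.append("speech")
--
--     if any(term in response.lower() for term in ["image generated", "created an image"]):
--         tools_used.append("image-generation")
--
--     if any(term in response.lower() for term in ["analyzed image", "image shows", "in this image"]):
--         tools_used.append("image-analysis")
--
--     return tools_used
-- ===== SOURCE B (Python) =====
-- # One left-to-right scan of the lowered text: at each position try every keyword
-- # (naive multi-pattern matching), record which tools fired, then emit tool names
-- # in the canonical order.
--
-- TERMS = [
--     ("search result", "web-search"), ("found information", "web-search"),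
--     ("according to", "web-search"), ("sources:", "web-search"),
--     ("scraped", "web-scrape"), ("from the website", "web-scrape"),
--     ("page content", "web-scrape"),
--     ("sms sent", "sms"), ("message sent", "sms"), ("texted", "sms"),
--     ("call initiated", "call"), ("called", "call"), ("phone call", "call"),
--     ("speaking", "speech"), ("audio response", "speech"), ("listen", "speech"),
--     ("image generated", "image-generation"), ("created an image", "image-generation"),
--     ("analyzed image", "image-analysis"), ("image shows", "image-analysis"),
--     ("in this image", "image-analysis"),
-- ]
--
-- ORDER = ["web-search", "web-scrape", "sms", "call", "speech",
--          "image-generation", "image-analysis"]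
--
-- def detect_tools_used(response):
--     resp = response.lower()
--     found = set()
--     for i in range(len(resp)):
--         for term, tool in TERMS:
--             if tool not in found and resp.startswith(term, i):
--                 found.add(tool)
--     return [t for t in ORDER if t in found]
-- ===== Notes on version B (the rewrite author's own statement) =====
-- stated objective: alternative
-- what changed: Replaces seven independent any-substring checks with a single left-to-right position scan of the lowered text that tries every keyword at each position (naive multi-pattern matching) into a found-set, then emits tool names in canonical order.
import Mathlib
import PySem

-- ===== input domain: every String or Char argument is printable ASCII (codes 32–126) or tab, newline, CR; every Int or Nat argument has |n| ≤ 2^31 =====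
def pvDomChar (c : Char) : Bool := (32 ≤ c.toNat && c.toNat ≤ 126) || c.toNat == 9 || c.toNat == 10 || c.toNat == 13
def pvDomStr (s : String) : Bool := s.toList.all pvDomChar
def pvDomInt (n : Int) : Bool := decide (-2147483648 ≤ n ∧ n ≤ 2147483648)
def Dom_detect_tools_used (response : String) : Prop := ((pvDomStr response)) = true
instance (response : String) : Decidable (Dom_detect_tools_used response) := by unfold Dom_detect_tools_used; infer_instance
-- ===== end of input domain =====

-- B replaces seven independent any-substring checks with a single left-to-right
-- position scan of the lowered text that tries every keyword at each position
-- into a found-set, then emits tool names in canonical order (objective: alternative).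


-- ===== PORT A =====
-- Python's  any(term in resp for term in terms)
def pvHit (resp : String) (terms : List String) : Bool :=
  terms.any (fun term => PySem.Str.isIn term resp)

-- literal transliteration: each branch re-lowers the response and appends on a keyword hit
def detect_tools_used (response : String) : List String :=
  let t0 : List String := []
  let t1 := if pvHit (PySem.Str.lower response) ["search result", "found information", "according to", "sources:"] then t0 ++ ["web-search"] else t0
  let t2 := if pvHit (PySem.Str.lower response) ["scraped", "from the website", "page content"] then t1 ++ ["web-scrape"] else t1
  let t3 := if pvHit (PySem.Str.lower response) ["sms sent", "message sent", "texted"] then t2 ++ ["sms"] else t2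
  let t4 := if pvHit (PySem.Str.lower response) ["call initiated", "called", "phone call"] then t3 ++ ["call"] else t3
  let t5 := if pvHit (PySem.Str.lower response) ["speaking", "audio response", "listen"] then t4 ++ ["speech"] else t4
  let t6 := if pvHit (PySem.Str.lower response) ["image generated", "created an image"] then t5 ++ ["image-generation"] else t5
  let t7 := if pvHit (PySem.Str.lower response) ["analyzed image", "image shows", "in this image"] then t6 ++ ["image-analysis"] else t6
  t7

-- ===== PORT B =====
-- Source B's flat (term, tool) table, in the same order
def pvTerms : List (String × String) :=
  [("search result", "web-search"), ("found information", "web-search"),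
   ("according to", "web-search"), ("sources:", "web-search"),
   ("scraped", "web-scrape"), ("from the website", "web-scrape"),
   ("page content", "web-scrape"),
   ("sms sent", "sms"), ("message sent", "sms"), ("texted", "sms"),
   ("call initiated", "call"), ("called", "call"), ("phone call", "call"),
   ("speaking", "speech"), ("audio response", "speech"), ("listen", "speech"),
   ("image generated", "image-generation"), ("created an image", "image-generation"),
   ("analyzed image", "image-analysis"), ("image shows", "image-analysis"),
   ("in this image", "image-analysis")]

def pvOrder : List String :=
  ["web-search", "web-scrape", "sms", "call", "speech", "image-generation", "image-analysis"]

-- resp.startswith(term, i): exact for 0 ≤ i ≤ len(resp) as (resp[i:]).startswith(term)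
def pvStartsAt (resp : List Char) (i : Nat) (term : String) : Bool :=
  PySem.Chars.startswith (resp.drop i) term.toList

-- the inner 'for term, tool in TERMS' body at one position i
def pvStep (resp : List Char) (i : Nat) (fd : PySem.Set String) : PySem.Set String :=
  pvTerms.foldl (fun fd p =>
    if !(PySem.Set.contains fd p.2) && pvStartsAt resp i p.1 then PySem.Set.add fd p.2 else fd) fd

def detect_tools_used_alt (response : String) : List String :=
  let resp := PySem.Chars.lower response.toList
  let found := (List.range resp.length).foldl (fun fd i => pvStep resp i fd) PySem.Set.empty
  pvOrder.filter (fun t => PySem.Set.contains found t)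

-- ===== PRECONDITION & SPEC =====
def Spec_detect_tools_used (response : String) (out : List String) : Prop := out = detect_tools_used_alt response
instance (response : String) (out : List String) : Decidable (Spec_detect_tools_used response out) := by unfold Spec_detect_tools_used; infer_instance

-- ===== CLAIM (what is proved, stated in full; the proofs are below) =====
def Claim_equal_detect_tools_used : Prop := ∀ (response : String), Dom_detect_tools_used response → Spec_detect_tools_used response (detect_tools_used response)

-- ===== LEMMAS AND PROOFS =====

-- membership after the inner loop of B over a (term, tool) table at one position
lemma mem_foldl_step (resp : List Char) (i : Nat) (L : List (String × String))
    (fd : PySem.Set String) (t : String) :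
    t ∈ L.foldl (fun fd p =>
        if !(PySem.Set.contains fd p.2) && pvStartsAt resp i p.1 then PySem.Set.add fd p.2 else fd) fd ↔
      t ∈ fd ∨ ∃ p ∈ L, p.2 = t ∧ pvStartsAt resp i p.1 = true := by
  induction L generalizing fd with
  | nil => simp
  | cons p L ih =>
    simp only [List.foldl_cons, ih, List.mem_cons]
    constructor
    · rintro (h | h)
      · split_ifs at h with hg
        · rcases (PySem.Set.mem_add _ _ _).1 h with h | h
          · exact Or.inl h
          · subst h
            simp only [Bool.and_eq_true, Bool.not_eq_true'] at hg
            exact Or.inr ⟨p, Or.inl rfl, rfl, hg.2⟩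
        · exact Or.inl h
      · rcases h with ⟨q, hq, h1, h2⟩
        exact Or.inr ⟨q, Or.inr hq, h1, h2⟩
    · rintro (h | ⟨q, hq | hq, h1, h2⟩)
      · left; split_ifs with hg
        · exact (PySem.Set.mem_add _ _ _).2 (Or.inl h)
        · exact h
      · subst hq; subst h1
        left
        by_cases hc : PySem.Set.contains fd q.2 = true
        · split_ifs with hg
          · exact (PySem.Set.mem_add _ _ _).2 (Or.inl ((PySem.Set.contains_iff _ _).1 hc))
          · exact (PySem.Set.contains_iff _ _).1 hc
        · rw [if_pos (by simp [h2]; exact fun hm => hc ((PySem.Set.contains_iff _ _).2 hm))]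
          exact (PySem.Set.mem_add _ _ _).2 (Or.inr rfl)
      · exact Or.inr ⟨q, hq, h1, h2⟩

-- membership after scanning positions 0..n-1
lemma mem_scan (resp : List Char) (n : Nat) (t : String) :
    t ∈ (List.range n).foldl (fun fd i => pvStep resp i fd) PySem.Set.empty ↔
      ∃ i < n, ∃ p ∈ pvTerms, p.2 = t ∧ pvStartsAt resp i p.1 = true := by
  induction n with
  | zero => simp [PySem.Set.empty]
  | succ n ih =>
    rw [List.range_succ, List.foldl_append]
    simp only [List.foldl_cons, List.foldl_nil]
    rw [show pvStep resp n ((List.range n).foldl (fun fd i => pvStep resp i fd) PySem.Set.empty)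
          = (pvTerms.foldl (fun fd p =>
              if !(PySem.Set.contains fd p.2) && pvStartsAt resp n p.1 then PySem.Set.add fd p.2 else fd)
              ((List.range n).foldl (fun fd i => pvStep resp i fd) PySem.Set.empty)) from rfl,
        mem_foldl_step, ih]
    constructor
    · rintro (⟨i, hi, h⟩ | h)
      · exact ⟨i, Nat.lt_succ_of_lt hi, h⟩
      · exact ⟨n, Nat.lt_succ_self n, h⟩
    · rintro ⟨i, hi, h⟩
      rcases Nat.lt_succ_iff_lt_or_eq.1 hi with hi | rfl
      · exact Or.inl ⟨i, hi, h⟩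
      · exact Or.inr h

-- a nonempty keyword occurs somewhere iff it matches at some scanned position
lemma exists_startsAt_iff (resp : List Char) (term : String) (h : term.toList ≠ []) :
    (∃ i < resp.length, pvStartsAt resp i term = true) ↔ PySem.Chars.isIn term.toList resp = true := by
  rw [← PySem.Chars.exists_prefix_drop_iff_isIn]
  constructor
  · rintro ⟨i, _, hp⟩
    exact ⟨i, (PySem.Chars.startswith_iff _ _).1 hp⟩
  · rintro ⟨j, hp⟩
    by_cases hj : j < resp.length
    · exact ⟨j, hj, (PySem.Chars.startswith_iff _ _).2 hp⟩
    · exact absurd (List.prefix_nil.mp (List.drop_eq_nil_of_le (Nat.le_of_not_lt hj) ▸ hp)) h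

lemma pvTerms_ne : ∀ p ∈ pvTerms, p.1.toList ≠ [] := by decide

-- what the scan's found-set contains, per tool name
lemma contains_scan (resp : List Char) (t : String) :
    PySem.Set.contains ((List.range resp.length).foldl (fun fd i => pvStep resp i fd) PySem.Set.empty) t
      = pvTerms.any (fun p => p.2 == t && PySem.Chars.isIn p.1.toList resp) := by
  rw [Bool.eq_iff_iff, PySem.Set.contains_iff, mem_scan]
  simp only [List.any_eq_true, Bool.and_eq_true, beq_iff_eq]
  constructor
  · rintro ⟨i, hi, p, hp, rfl, hs⟩
    exact ⟨p, hp, rfl, (exists_startsAt_iff resp p.1 (pvTerms_ne p hp)).1 ⟨i, hi, hs⟩⟩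
  · rintro ⟨p, hp, rfl, hin⟩
    obtain ⟨i, hi, hs⟩ := (exists_startsAt_iff resp p.1 (pvTerms_ne p hp)).2 hin
    exact ⟨i, hi, p, hp, rfl, hs⟩

-- ===== VERDICT (by name: the statement is the Claim_ definition above) =====
theorem detect_tools_used_spec : Claim_equal_detect_tools_used := by
  intro response _
  unfold Spec_detect_tools_used detect_tools_used detect_tools_used_alt pvOrder
  simp only [List.filter_cons, List.filter_nil, contains_scan]
  simp only [pvTerms, pvHit, List.any_cons, List.any_nil, beq_self_eq_true, String.reduceBEq,
    Bool.true_and, Bool.false_and, Bool.or_false, Bool.false_or,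
    PySem.Str.isIn_eq, PySem.Str.toList_lower]
  generalize (PySem.Chars.isIn "search result".toList (PySem.Chars.lower response.toList) || (PySem.Chars.isIn "found information".toList (PySem.Chars.lower response.toList) || (PySem.Chars.isIn "according to".toList (PySem.Chars.lower response.toList) || PySem.Chars.isIn "sources:".toList (PySem.Chars.lower response.toList)))) = cond0
  generalize (PySem.Chars.isIn "scraped".toList (PySem.Chars.lower response.toList) || (PySem.Chars.isIn "from the website".toList (PySem.Chars.lower response.toList) || PySem.Chars.isIn "page content".toList (PySem.Chars.lower response.toList))) = cond1
  generalize (PySem.Chars.isIn "sms sent".toList (PySem.Chars.lower response.toList) || (PySem.Chars.isIn "message sent".toList (PySem.Chars.lower response.toList) || PySem.Chars.isIn "texted".toList (PySem.Chars.lower response.toList))) = cond2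
  generalize (PySem.Chars.isIn "call initiated".toList (PySem.Chars.lower response.toList) || (PySem.Chars.isIn "called".toList (PySem.Chars.lower response.toList) || PySem.Chars.isIn "phone call".toList (PySem.Chars.lower response.toList))) = cond3
  generalize (PySem.Chars.isIn "speaking".toList (PySem.Chars.lower response.toList) || (PySem.Chars.isIn "audio response".toList (PySem.Chars.lower response.toList) || PySem.Chars.isIn "listen".toList (PySem.Chars.lower response.toList))) = cond4
  generalize (PySem.Chars.isIn "image generated".toList (PySem.Chars.lower response.toList) || PySem.Chars.isIn "created an image".toList (PySem.Chars.lower response.toList)) = cond5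
  generalize (PySem.Chars.isIn "analyzed image".toList (PySem.Chars.lower response.toList) || (PySem.Chars.isIn "image shows".toList (PySem.Chars.lower response.toList) || PySem.Chars.isIn "in this image".toList (PySem.Chars.lower response.toList))) = cond6
  cases cond0 <;> cases cond1 <;> cases cond2 <;> cases cond3 <;> cases cond4 <;> cases cond5 <;> cases cond6 <;> rfl
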